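-- pv_equiv track=rewrite | github.com/km1994/NLP_CS224n | Assignments/official/homework1/zh/tools.py | text_features
-- ===== SOURCE A (Python) =====
-- def text_features(train_data_list, test_data_list, feature_words):
--     '''
--     # 用选取的特征词构建0-1矩阵
--     # 对训练数据集train_data_list中每篇切完词之后的文档构建特征向量（
--     # 由上述1000个特征词组成），若出现则取值为1，否则为0。
--     # 于是文章构建出了[90,1000]维度的0-1矩阵。
--     :param train_data_list:     list        训练集列表
--     :param test_data_list:      list        测试集列表
--     :param feature_words:       list        特征词列表
--     :return:
--     '''
--     def text_features(text, feature_words):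
--         # text = train_data_list[0]
--         text_words = set(text)
--         features = [1 if word in text_words else 0 for word in feature_words]
--         return features
--
--     # 0,1的矩阵（1000列-维度）
--     train_feature_list = [text_features(text.split(" "), feature_words) for text in train_data_list]
--     test_feature_list = [text_features(text.split(" "), feature_words) for text in test_data_list]
--     return train_feature_list, test_feature_list
-- ===== SOURCE B (Python) =====
-- def text_features(train_data_list, test_data_list, feature_words):
--     # Index each feature word to ALL of its positions, once, outside the per-doc loop.
--     index = {}
--     for i, w in enumerate(feature_words):
--         index[w] = index.get(w, []) + [i]
--     n = len(feature_words)
--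
--     def vector(text):
--         v = [0] * n
--         for w in text.split(" "):
--             if w in index:
--                 for i in index[w]:
--                     v[i] = 1
--         return v
--
--     return [vector(t) for t in train_data_list], [vector(t) for t in test_data_list]
-- ===== Notes on version B (the rewrite author's own statement) =====
-- stated objective: alternative
-- what changed: Instead of testing every feature word against each document's word set, B precomputes one dict mapping each feature word to all its positions, then per document walks the document's words and marks the mapped positions in a zero vector.
import Mathlib
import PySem

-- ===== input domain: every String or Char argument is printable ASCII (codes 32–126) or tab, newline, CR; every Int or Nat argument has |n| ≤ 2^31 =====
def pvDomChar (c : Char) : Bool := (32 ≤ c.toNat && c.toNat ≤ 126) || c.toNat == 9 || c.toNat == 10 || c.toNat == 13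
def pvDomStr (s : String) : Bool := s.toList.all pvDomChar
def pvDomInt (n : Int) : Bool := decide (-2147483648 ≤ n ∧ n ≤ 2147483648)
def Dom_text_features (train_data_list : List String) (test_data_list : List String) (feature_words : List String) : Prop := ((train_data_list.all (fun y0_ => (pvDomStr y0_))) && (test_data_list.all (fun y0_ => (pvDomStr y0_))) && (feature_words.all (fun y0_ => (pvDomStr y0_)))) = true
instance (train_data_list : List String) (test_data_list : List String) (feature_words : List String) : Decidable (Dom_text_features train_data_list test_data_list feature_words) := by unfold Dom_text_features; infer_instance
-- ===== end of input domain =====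

-- B builds one feature-word -> positions index and marks positions of each document word (alternative traversal); A tests each feature word against the document's word set.


-- ===== PORT A =====
-- inner helper 'text_features(text, feature_words)' of A
def text_features_one (text : List String) (feature_words : List String) : List Int :=
  let text_words : PySem.Set String := PySem.Set.ofList text
  feature_words.map (fun word => if PySem.Set.contains text_words word then (1 : Int) else 0)

def text_features (train_data_list : List String) (test_data_list : List String) (feature_words : List String) : List (List Int) × List (List Int) :=
  let train_feature_list := train_data_list.map (fun text => text_features_one (((PySem.Str.split? text " ").getD [])) feature_words)
  let test_feature_list := test_data_list.map (fun text => text_features_one (((PySem.Str.split? text " ").getD [])) feature_words)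
  (train_feature_list, test_feature_list)

-- ===== PORT B =====
-- 'index[w] = index.get(w, []) + [i]' is exactly Dict.modify w [] (· ++ [i])
def tf_index (feature_words : List String) : PySem.Dict String (List Int) :=
  (PySem.List.enumerate feature_words 0).foldl
    (fun d p => d.modify p.2 [] (fun l => l ++ [p.1])) PySem.Dict.empty

-- 'v[i] = 1' is pySetD (indices come from enumerate, hence in range); 'index[w]' under 'w in index' is getD w []
def tf_vector (index : PySem.Dict String (List Int)) (n : Int) (text : String) : List Int :=
  (((PySem.Str.split? text " ").getD [])).foldl
    (fun v w =>
      if index.contains w then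
        (index.getD w []).foldl (fun v i => PySem.List.pySetD v i 1) v
      else v)
    (PySem.List.pyRepeat [(0 : Int)] n)

def text_features_alt (train_data_list : List String) (test_data_list : List String) (feature_words : List String) : List (List Int) × List (List Int) :=
  let index := tf_index feature_words
  let n : Int := (feature_words.length : Int)
  (train_data_list.map (fun t => tf_vector index n t), test_data_list.map (fun t => tf_vector index n t))

-- ===== PRECONDITION & SPEC =====
def Spec_text_features (train_data_list : List String) (test_data_list : List String) (feature_words : List String) (out : List (List Int) × List (List Int)) : Prop := out = text_features_alt train_data_list test_data_list feature_words
instance (train_data_list : List String) (test_data_list : List String) (feature_words : List String) (out : List (List Int) × List (List Int)) : Decidable (Spec_text_features train_data_list test_data_list feature_words out) := by unfold Spec_text_features; infer_instance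

-- ===== CLAIM (what is proved, stated in full; the proofs are below) =====
def Claim_equal_text_features : Prop := ∀ (train_data_list : List String) (test_data_list : List String) (feature_words : List String), Dom_text_features train_data_list test_data_list feature_words → Spec_text_features train_data_list test_data_list feature_words (text_features train_data_list test_data_list feature_words)

-- ===== LEMMAS AND PROOFS =====

-- the index maps w to the (Int) positions of w in feature_words, in order
theorem tf_index_getD (feature_words : List String) (w : String) :
    (tf_index feature_words).getD w [] =
      (((PySem.List.enumerate feature_words 0).filter (fun p => p.2 == w)).map (fun p => p.1)) := by
  unfold tf_index
  rw [← List.foldl_map (f := fun p : Int × String => (p.2, p.1))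
        (g := fun (d : PySem.Dict String (List Int)) q => d.modify q.1 [] (fun l => l ++ [q.2]))
        (l := PySem.List.enumerate feature_words 0) (init := PySem.Dict.empty)]
  rw [PySem.Dict.getD_foldl_modify_append]
  simp [List.filter_map, List.map_map, Function.comp_def]

theorem mem_tf_index_getD (feature_words : List String) (w : String) (i : Int) :
    i ∈ (tf_index feature_words).getD w [] ↔
      ∃ (k : Nat) (h : k < feature_words.length), feature_words[k] = w ∧ i = (k : Int) := by
  rw [tf_index_getD]
  simp only [List.mem_map, List.mem_filter, PySem.List.mem_enumerate_iff]
  constructor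
  · rintro ⟨p, ⟨⟨k, hk, rfl⟩, hw⟩, rfl⟩
    exact ⟨k, hk, by simpa using hw, by simp⟩
  · rintro ⟨k, hk, hw, rfl⟩
    exact ⟨(0 + (k : Int), feature_words[k]), ⟨⟨k, hk, rfl⟩, by simpa using hw⟩, by simp⟩

theorem tf_index_contains (feature_words : List String) (w : String) :
    (tf_index feature_words).contains w = true ↔ w ∈ feature_words := by
  rw [PySem.Dict.contains_iff_mem_keys]
  unfold tf_index
  rw [PySem.Dict.keys_foldl_modify_key (PySem.List.enumerate feature_words 0) (fun p => p.2) []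
        (fun _ p => (fun l => l ++ [p.1])) PySem.Dict.empty]
  simp only [PySem.Dict.keys_empty, PySem.Set.update_nil_left, PySem.List.map_snd_enumerate]
  exact PySem.Set.mem_ofList feature_words w

theorem length_foldl_pySetD (is : List Int) (v : List Int) :
    (is.foldl (fun v i => PySem.List.pySetD v i 1) v).length = v.length := by
  induction is generalizing v with
  | nil => rfl
  | cons i is ih => simp [List.foldl_cons, ih, PySem.List.length_pySetD]

theorem getD_foldl_pySetD (is : List Int) (v : List Int)
    (hb : ∀ i ∈ is, ∃ k : Nat, k < v.length ∧ i = (k : Int)) (j : Nat) :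
    PySem.List.pyGetD (is.foldl (fun v i => PySem.List.pySetD v i 1) v) (j : Int) 0 =
      if (j : Int) ∈ is then 1 else PySem.List.pyGetD v (j : Int) 0 := by
  induction is generalizing v with
  | nil => simp
  | cons i is ih =>
    obtain ⟨k, hk, rfl⟩ := hb i (List.mem_cons_self)
    have hb' : ∀ i ∈ is, ∃ k2 : Nat, k2 < (PySem.List.pySetD v (k : Int) 1).length ∧ i = (k2 : Int) := by
      intro i hi
      obtain ⟨k', hk', rfl⟩ := hb i (List.mem_cons_of_mem _ hi)
      exact ⟨k', by simpa [PySem.List.length_pySetD] using hk', rfl⟩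
    rw [List.foldl_cons, ih _ hb']
    rw [PySem.List.pyGetD_pySetD_natCast v k j 1 0 hk]
    by_cases hmem : (j : Int) ∈ is
    · simp [hmem]
    · by_cases hjk : j = k
      · subst hjk; simp [hmem]
      · have : ¬ ((j : Int) = (k : Int)) := by exact_mod_cast hjk
        simp [hmem, hjk, this]

-- one step of B's document loop, on a vector of the shape fws.map g
theorem tf_step (fws : List String) (g : String → Int) (w : String) :
    (if (tf_index fws).contains w then
        ((tf_index fws).getD w []).foldl (fun v i => PySem.List.pySetD v i 1) (fws.map g)
      else fws.map g) =
      fws.map (fun x => if x = w then 1 else g x) := by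
  by_cases hw : w ∈ fws
  · rw [if_pos ((tf_index_contains fws w).mpr hw)]
    have hlen : (((tf_index fws).getD w []).foldl (fun v i => PySem.List.pySetD v i 1) (fws.map g)).length = fws.length := by
      rw [length_foldl_pySetD]; simp
    apply List.ext_getElem (by simp [hlen])
    intro j hj hj2
    have hjlt : j < fws.length := by omega
    have hb : ∀ i ∈ (tf_index fws).getD w [], ∃ k : Nat, k < (fws.map g).length ∧ i = (k : Int) := by
      intro i hi
      obtain ⟨k, hk, _, rfl⟩ := (mem_tf_index_getD fws w i).mp hi
      exact ⟨k, by simpa using hk, rfl⟩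
    have h1 := getD_foldl_pySetD ((tf_index fws).getD w []) (fws.map g) hb j
    have h2 : PySem.List.pyGetD (((tf_index fws).getD w []).foldl (fun v i => PySem.List.pySetD v i 1) (fws.map g)) (j : Int) 0
        = (((tf_index fws).getD w []).foldl (fun v i => PySem.List.pySetD v i 1) (fws.map g))[j]'hj := by
      rw [PySem.List.pyGetD_eq_getElem _ 0 (by positivity) (by rw [hlen]; exact_mod_cast hjlt)]
      simp
    have h3 : PySem.List.pyGetD (fws.map g) (j : Int) 0 = g (fws[j]'hjlt) := by
      rw [PySem.List.pyGetD_eq_getElem _ 0 (by positivity) (by simpa using hjlt)]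
      simp
    have hmem : (j : Int) ∈ (tf_index fws).getD w [] ↔ fws[j]'hjlt = w := by
      rw [mem_tf_index_getD]
      constructor
      · rintro ⟨k, hk, hkw, hjk⟩
        have : j = k := by exact_mod_cast hjk
        subst this; exact hkw
      · intro h; exact ⟨j, hjlt, h, rfl⟩
    rw [← h2, h1, List.getElem_map]
    by_cases hx : fws[j]'hjlt = w
    · rw [if_pos (hmem.mpr hx), if_pos hx]
    · rw [if_neg (fun hc => hx (hmem.mp hc)), if_neg hx, h3]
  · rw [if_neg (by simpa using fun hc => hw ((tf_index_contains fws w).mp hc))]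
    apply List.map_congr_left
    intro x hx
    have : ¬ x = w := fun h => hw (h ▸ hx)
    simp [this]

theorem tf_loop (fws : List String) (ws : List String) (g : String → Int) :
    (ws.foldl
      (fun v w =>
        if (tf_index fws).contains w then
          ((tf_index fws).getD w []).foldl (fun v i => PySem.List.pySetD v i 1) v
        else v)
      (fws.map g)) =
      fws.map (fun x => if x ∈ ws then 1 else g x) := by
  induction ws generalizing g with
  | nil => simp
  | cons w rest ih =>
    rw [List.foldl_cons, tf_step fws g w, ih]
    apply List.map_congr_left
    intro x _
    by_cases hr : x ∈ rest
    · simp [hr]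
    · by_cases hxw : x = w
      · simp [hxw]
      · simp [hr, hxw]

theorem tf_vector_eq (fws : List String) (text : String) :
    tf_vector (tf_index fws) (fws.length : Int) text =
      text_features_one (((PySem.Str.split? text " ").getD [])) fws := by
  unfold tf_vector text_features_one
  rw [PySem.List.pyRepeat_singleton]
  have hrep : List.replicate ((fws.length : Int)).toNat (0 : Int) = fws.map (fun _ => (0 : Int)) := by
    simp [List.map_const']
  rw [hrep, tf_loop]
  apply List.map_congr_left
  intro x _
  by_cases hx : x ∈ ((PySem.Str.split? text " ").getD [])
  · simp [hx, PySem.Set.mem_ofList]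
  · simp [hx, PySem.Set.mem_ofList]

-- ===== VERDICT (by name: the statement is the Claim_ definition above) =====
theorem text_features_spec : Claim_equal_text_features := by
  intro tr te fws _
  unfold Spec_text_features
  simp only [text_features, text_features_alt]
  have h : ∀ l : List String,
      l.map (fun text => text_features_one ((PySem.Str.split? text " ").getD []) fws) =
        l.map (fun t => tf_vector (tf_index fws) (fws.length : Int) t) :=
    fun l => List.map_congr_left (fun t _ => (tf_vector_eq fws t).symm)
  rw [h tr, h te]
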